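-- pv_equiv track=rewrite | github.com/nailg1234/kdt4 | Python/programmers/lv1/80-89/81_공원.py | solution
-- ===== SOURCE A (Python) =====
-- def solution(mats, park):
--     answer = -1
--     for _row_idx, _row in enumerate(park):
--         for _col_idx, _col in enumerate(_row):
--             if _col == '-1':
--                 answer = max(answer, 1)
--                 col_cnt = 1
--                 row_cnt = 1
--                 for __col_idx in range(_col_idx + 1, len(park[0])):
--                     if park[_row_idx][__col_idx] == '-1':
--                         col_cnt += 1
--                     else:
--                         break
--                 for i in range(1, col_cnt):
--                     if len(park) > _row_idx + i and park[_row_idx + i][_col_idx] == '-1':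
--                         row_cnt += 1
--                     else:
--                         break
--                 if col_cnt > 1 and row_cnt > 1:
--                     n = min(col_cnt, row_cnt)
--                     row_l = []
--                     col_l = []
--                     for _r_idx in range(1, n):
--                         for _c_idx in range(1, n):
--                             if park[_row_idx + _r_idx][_col_idx + _c_idx] != '-1':
--                                 row_l.append(_r_idx)
--                                 col_l.append(_c_idx)
--                     if not row_l and not col_l:
--                         answer = max(answer, n)
--     low_l = []
--     if answer in mats:
--         return answer
--     else:
--         for mat in mats:
--             if answer > mat:
--                 low_l.append(mat)
--         if low_l:
--             return max(low_l)
--         else: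
--             return -1
-- ===== SOURCE B (Python) =====
-- def runs(xs):
--     # length of the consecutive '-1' run starting at each position, via one reverse scan
--     out = []
--     run = 0
--     for x in reversed(xs):
--         run = run + 1 if x == '-1' else 0
--         out.append(run)
--     out.reverse()
--     return out
--
--
-- def column_runs(park):
--     # runs() of every column of the (rectangular) grid
--     if park:
--         return [runs([row[c] for row in park]) for c in range(len(park[0]))]
--     return []
--
--
-- def solution(mats, park):
--     right = [runs(row) for row in park]   # right[r][c]: '-1' run to the right from (r, c)
--     down_t = column_runs(park)            # down_t[c][r]: '-1' run downward from (r, c)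
--     best = -1
--     for r, row in enumerate(park):
--         for c, cell in enumerate(row):
--             if cell == '-1':
--                 n = min(down_t[c][r], right[r][c])
--                 if n > 1 and all(n <= right[r + i][c] for i in range(1, n)):
--                     best = max(best, n)
--                 else:
--                     best = max(best, 1)
--     return max((m for m in mats if m <= best), default=-1)
-- ===== Notes on version B (the rewrite author's own statement) =====
-- stated objective: alternative
-- what changed: B precomputes rightward and downward '-1' run-length tables in linear scans over rows and columns and tests each candidate square with one run-length comparison per row instead of A's per-cell rescans and interior double loop, and replaces the final membership-then-filter step on mats by a single max over mats values <= best.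
-- outside the precondition, e.g. on solution([1], [['a', 'b'], ['c']]): A returns -1, B raises IndexError
import Mathlib
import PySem

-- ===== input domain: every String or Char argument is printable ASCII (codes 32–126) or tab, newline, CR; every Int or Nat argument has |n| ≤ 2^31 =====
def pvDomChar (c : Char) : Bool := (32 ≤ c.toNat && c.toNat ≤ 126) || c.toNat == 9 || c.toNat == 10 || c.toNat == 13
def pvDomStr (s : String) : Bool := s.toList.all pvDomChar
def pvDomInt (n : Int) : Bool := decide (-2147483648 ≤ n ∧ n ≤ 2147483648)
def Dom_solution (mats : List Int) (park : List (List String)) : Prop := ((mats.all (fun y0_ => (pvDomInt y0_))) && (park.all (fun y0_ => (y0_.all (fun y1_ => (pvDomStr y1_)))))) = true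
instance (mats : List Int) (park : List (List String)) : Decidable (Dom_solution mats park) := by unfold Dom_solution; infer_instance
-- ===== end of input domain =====

-- B replaces A's per-cell rescans and interior double loop by precomputed run-length
-- tables and a per-row run comparison; return values agree on all grids admitted by
-- Pre_solution.

-- ===== PORT A =====
-- park[r][c] (both indexings; in-range on the admitted inputs, so the defaults are never returned)
def pvCell (park : List (List String)) (r c : Int) : String :=
  PySem.List.pyGetD (PySem.List.pyGetD park r []) c ""

-- 'for __col_idx in range(...): if ... col_cnt += 1 else break'
def pvColCnt (park : List (List String)) (r : Int) (idxs : List Int) (cnt : Int) : Int :=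
  match idxs with
  | [] => cnt
  | j :: rest => if pvCell park r j = "-1" then pvColCnt park r rest (cnt + 1) else cnt

-- 'for i in range(1, col_cnt): if len(park) > _row_idx + i and ... row_cnt += 1 else break'
def pvRowCnt (park : List (List String)) (r c : Int) (idxs : List Int) (cnt : Int) : Int :=
  match idxs with
  | [] => cnt
  | i :: rest =>
    if (park.length : Int) > r + i ∧ pvCell park (r + i) c = "-1"
    then pvRowCnt park r c rest (cnt + 1) else cnt

-- the interior double loop appending to row_l / col_l
def pvInner (park : List (List String)) (r c : Int) (rIdxs cIdxs : List Int) :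
    List Int × List Int :=
  rIdxs.foldl (fun acc ri =>
    cIdxs.foldl (fun acc2 ci =>
      if pvCell park (r + ri) (c + ci) ≠ "-1"
      then (acc2.1 ++ [ri], acc2.2 ++ [ci]) else acc2) acc) ([], [])

-- the body of A's two enumerate loops for one cell
def pvStepA (park : List (List String)) (answer : Int) (r c : Int) : Int :=
  if pvCell park r c = "-1" then
    let answer1 := max answer 1
    let colCnt := pvColCnt park r
      (PySem.List.pyRange (c + 1) ((PySem.List.pyGetD park 0 []).length : Int)) 1
    let rowCnt := pvRowCnt park r c (PySem.List.pyRange 1 colCnt) 1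
    if colCnt > 1 ∧ rowCnt > 1 then
      let n := min colCnt rowCnt
      let p := pvInner park r c (PySem.List.pyRange 1 n) (PySem.List.pyRange 1 n)
      if p.1 = [] ∧ p.2 = [] then max answer1 n else answer1
    else answer1
  else answer

def solution (mats : List Int) (park : List (List String)) : Int :=
  let answer : Int :=
    (PySem.List.enumerate park 0).foldl (fun ans p =>
      (PySem.List.enumerate p.2 0).foldl (fun a q => pvStepA park a p.1 q.1) ans) (-1)
  if answer ∈ mats then answer
  else
    let lowL := mats.foldl (fun l m => if answer > m then l ++ [m] else l) ([] : List Int)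
    if lowL ≠ [] then (PySem.List.max? lowL (fun x => x)).getD (-1) else -1

-- ===== PORT B =====
-- runs(xs): reverse scan accumulating the current run, then reverse the output
def pvRuns (xs : List String) : List Int :=
  let p := xs.reverse.foldl
    (fun (st : Int × List Int) x =>
      let run : Int := if x = "-1" then st.1 + 1 else 0
      (run, st.2 ++ [run])) ((0 : Int), ([] : List Int))
  p.2.reverse

-- column_runs(park)
def pvDownT (park : List (List String)) : List (List Int) :=
  if park = [] then []
  else (PySem.List.pyRange 0 ((PySem.List.pyGetD park 0 []).length : Int)).map
    (fun c => pvRuns (park.map (fun row => PySem.List.pyGetD row c "")))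

-- t[i][j] for the run tables
def pvAtB (t : List (List Int)) (i j : Int) : Int :=
  PySem.List.pyGetD (PySem.List.pyGetD t i []) j 0

def solution_alt (mats : List Int) (park : List (List String)) : Int :=
  let right := park.map pvRuns
  let downT := pvDownT park
  let best : Int :=
    (PySem.List.enumerate park 0).foldl (fun b p =>
      (PySem.List.enumerate p.2 0).foldl (fun b2 q =>
        if q.2 = "-1" then
          let n := min (pvAtB downT q.1 p.1) (pvAtB right p.1 q.1)
          if n > 1 ∧ ((PySem.List.pyRange 1 n).all fun i => decide (n ≤ pvAtB right (p.1 + i) q.1))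
          then max b2 n else max b2 1
        else b2) b) (-1)
  (PySem.List.max? (mats.filter (fun m => m ≤ best)) (fun x => x)).getD (-1)

-- ===== PRECONDITION & SPEC =====
-- Pre_ admits grids whose rows are at least as long as the first row and carry no '-1'
-- beyond the first row's width: outside that, A's row indexing (bounded by len(park[0]))
-- can raise IndexError, as can B's column building; A still returns on some such ragged
-- grids (e.g. with no '-1' cell), see cites.
def Pre_solution (mats : List Int) (park : List (List String)) : Prop :=
  ∀ row ∈ park, (park.headD []).length ≤ row.length ∧
    ∀ s ∈ row.drop (park.headD []).length, s ≠ "-1"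
instance (mats : List Int) (park : List (List String)) : Decidable (Pre_solution mats park) := by
  unfold Pre_solution; infer_instance

def pvWitness_solution : List Int × List (List String) :=
  ([2, 3], [["-1", "-1"], ["-1", "x"]])

def Spec_solution (mats : List Int) (park : List (List String)) (out : Int) : Prop := out = solution_alt mats park
instance (mats : List Int) (park : List (List String)) (out : Int) : Decidable (Spec_solution mats park out) := by unfold Spec_solution; infer_instance

-- ===== CLAIM (what is proved, stated in full; the proofs are below) =====
def Claim_equal_solution : Prop := ∀ (mats : List Int) (park : List (List String)), Dom_solution mats park → Pre_solution mats park → Spec_solution mats park (solution mats park)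

-- ===== LEMMAS AND PROOFS =====

-- length of the '-1' run of xs starting at position k
def pvRunAt (xs : List String) (k : Nat) : Nat :=
  ((xs.drop k).takeWhile (fun s => decide (s = "-1"))).length

-- structural-recursion description of pvRuns
def pvRunsSpec : List String → List Int
  | [] => []
  | x :: t => (if x = "-1" then (pvRunsSpec t).headD 0 + 1 else 0) :: pvRunsSpec t

lemma pvHead?_getD {α : Type} (l : List α) (d : α) : l.head?.getD d = l.getD 0 d := by
  cases l <;> rfl

lemma pvRuns_rev_foldl (xs : List String) :
    xs.reverse.foldl
      (fun (st : Int × List Int) x =>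
        let run : Int := if x = "-1" then st.1 + 1 else 0
        (run, st.2 ++ [run])) ((0 : Int), ([] : List Int))
    = ((pvRunsSpec xs).headD 0, (pvRunsSpec xs).reverse) := by
  induction xs with
  | nil => rfl
  | cons x t ih =>
    rw [List.reverse_cons, List.foldl_append, ih]
    simp [pvRunsSpec]

lemma pvRuns_eq_spec (xs : List String) : pvRuns xs = pvRunsSpec xs := by
  unfold pvRuns
  rw [pvRuns_rev_foldl]
  simp

lemma pvRunAt_of_le (xs : List String) (k : Nat) (h : xs.length ≤ k) : pvRunAt xs k = 0 := by
  unfold pvRunAt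
  rw [List.drop_eq_nil_of_le h]
  rfl

lemma pvRunAt_succ (xs : List String) (k : Nat) (hk : k < xs.length)
    (h : xs.getD k "" = "-1") : pvRunAt xs k = 1 + pvRunAt xs (k + 1) := by
  unfold pvRunAt
  rw [List.drop_eq_getElem_cons hk, List.takeWhile_cons]
  rw [List.getD_eq_getElem xs _ hk] at h
  simp [h]
  omega

lemma pvRunAt_zero_of_ne (xs : List String) (k : Nat) (h : ¬ xs.getD k "" = "-1") :
    pvRunAt xs k = 0 := by
  unfold pvRunAt
  by_cases hk : k < xs.length
  · rw [List.drop_eq_getElem_cons hk, List.takeWhile_cons]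
    rw [List.getD_eq_getElem xs _ hk] at h
    simp [h]
  · rw [List.drop_eq_nil_of_le (by omega)]; rfl

lemma pvRunAt_le (xs : List String) (k : Nat) : pvRunAt xs k ≤ xs.length - k := by
  unfold pvRunAt
  calc ((xs.drop k).takeWhile _).length ≤ (xs.drop k).length := (List.takeWhile_sublist _).length_le
    _ = xs.length - k := List.length_drop ..

lemma getD_pvRunsSpec (xs : List String) (k : Nat) :
    (pvRunsSpec xs).getD k 0 = (pvRunAt xs k : Int) := by
  induction xs generalizing k with
  | nil => simp [pvRunsSpec, pvRunAt]
  | cons x t ih =>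
    cases k with
    | zero =>
      have hh : (pvRunsSpec t).head?.getD 0 = ((t.takeWhile (fun s => decide (s = "-1"))).length : Int) := by
        rw [pvHead?_getD]; simpa [pvRunAt] using ih (k := 0)
      simp only [pvRunsSpec, List.getD_cons_zero]
      by_cases hx : x = "-1" <;> simp [pvRunAt, hx, hh]
    | succ k =>
      simp only [pvRunsSpec, List.getD_cons_succ]
      rw [ih]
      simp [pvRunAt]

-- m ≤ run-at-k  ⟺  the next m cells exist and are '-1'
lemma pvRunAt_ge_iff (xs : List String) (m k : Nat) :
    m ≤ pvRunAt xs k ↔ ∀ j < m, k + j < xs.length ∧ xs.getD (k + j) "" = "-1" := by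
  induction m generalizing k with
  | zero => simp
  | succ m ih =>
    constructor
    · intro h j hj
      have hk : k < xs.length := by
        by_contra hk
        rw [pvRunAt_of_le xs k (by omega)] at h; omega
      have hx : xs.getD k "" = "-1" := by
        by_contra hx
        rw [pvRunAt_zero_of_ne xs k hx] at h; omega
      rcases Nat.eq_zero_or_pos j with rfl | hj0
      · exact ⟨by simpa using hk, by simpa using hx⟩
      · obtain ⟨j', rfl⟩ : ∃ j', j = j' + 1 := ⟨j - 1, by omega⟩
        have h' : m ≤ pvRunAt xs (k + 1) := by
          rw [pvRunAt_succ xs k hk hx] at h; omega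
        have hres := (ih (k + 1)).mp h' j' (by omega)
        rw [show k + (j' + 1) = k + 1 + j' from by omega]
        exact hres
    · intro h
      have h0 := h 0 (by omega)
      have hk : k < xs.length := by simpa using h0.1
      have hx : xs.getD k "" = "-1" := by simpa using h0.2
      rw [pvRunAt_succ xs k hk hx]
      have hrest : m ≤ pvRunAt xs (k + 1) := by
        apply (ih (k + 1)).mpr
        intro j hj
        have hj1 := h (j + 1) (by omega)
        rw [show k + 1 + j = k + (j + 1) from by omega]
        exact hj1
      omega

lemma pvCell_natCast (park : List (List String)) (t u : Nat) :
    pvCell park (t : Int) (u : Int) = (park.getD t []).getD u "" := by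
  unfold pvCell
  rw [PySem.List.pyGetD_natCast, PySem.List.pyGetD_natCast]

lemma pvGetD_map' {α β : Type} (f : α → β) (l : List α) (n : Nat) (d : β) :
    (l.map f).getD n d = if h : n < l.length then f l[n] else d := by
  split_ifs with h
  · rw [List.getD_eq_getElem _ _ (by simpa using h)]
    simp
  · rw [List.getD_eq_default _ _ (by simpa using (by omega : l.length ≤ n))]

lemma pvColCnt_eq (park : List (List String)) (r : Nat) (W : Nat)
    (hge : W ≤ (park.getD r []).length)
    (htail : ∀ u : Nat, W ≤ u → (park.getD r []).getD u "" ≠ "-1") :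
    ∀ (fuel j : Nat) (k : Int), W - j ≤ fuel →
      pvColCnt park (r : Int) (PySem.List.pyRange (j : Int) (W : Int)) k
        = k + (pvRunAt (park.getD r []) j : Int) := by
  intro fuel
  induction fuel with
  | zero =>
    intro j k hf
    have hW' : (W : Int) ≤ (j : Int) := by exact_mod_cast (by omega : W ≤ j)
    have hemp : PySem.List.pyRange (j : Int) (W : Int) = [] := by simp [pysem, hW']
    rw [hemp, pvRunAt_zero_of_ne _ _ (htail j (by omega))]
    simp [pvColCnt]
  | succ fuel ih =>
    intro j k hf
    by_cases hj : j < W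
    · rw [PySem.List.pyRange_one_cons (by exact_mod_cast hj)]
      have hcast : ((j : Int) + 1) = ((j + 1 : Nat) : Int) := by push_cast; ring
      simp only [pvColCnt, hcast, pvCell_natCast]
      by_cases hx : (park.getD r []).getD j "" = "-1"
      · rw [if_pos hx, ih (j + 1) (k + 1) (by omega), pvRunAt_succ _ _ (by omega) hx]
        push_cast; ring
      · rw [if_neg hx, pvRunAt_zero_of_ne _ _ hx]
        simp
    · have hW' : (W : Int) ≤ (j : Int) := by exact_mod_cast (by omega : W ≤ j)
      have hemp : PySem.List.pyRange (j : Int) (W : Int) = [] := by simp [pysem, hW']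
      rw [hemp, pvRunAt_zero_of_ne _ _ (htail j (by omega))]
      simp [pvColCnt]

lemma pvRowCnt_eq (park : List (List String)) (r c : Nat) :
    ∀ (fuel i m : Nat) (k : Int), i ≤ m → m - i ≤ fuel →
      pvRowCnt park (r : Int) (c : Int) (PySem.List.pyRange (i : Int) (m : Int)) k
        = k + (min (m - i) (pvRunAt (park.map (fun row => PySem.List.pyGetD row (c : Int) "")) (r + i)) : Int) := by
  intro fuel
  induction fuel with
  | zero =>
    intro i m k him hf
    have hi : i = m := by omega
    subst hi
    have hemp : PySem.List.pyRange (i : Int) (i : Int) = [] := by simp [pysem]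
    rw [hemp]
    simp [pvRowCnt]
  | succ fuel ih =>
    intro i m k him hf
    by_cases hi : i < m
    · rw [PySem.List.pyRange_one_cons (by exact_mod_cast hi)]
      have hcast : ((i : Int) + 1) = ((i + 1 : Nat) : Int) := by push_cast; ring
      have hcast2 : ((r : Int) + (i : Int)) = ((r + i : Nat) : Int) := by push_cast; ring
      simp only [pvRowCnt, hcast, hcast2, pvCell_natCast]
      have hcol : ∀ t : Nat, t < park.length →
          (park.map (fun row => PySem.List.pyGetD row (c : Int) "")).getD t ""
            = (park.getD t []).getD c "" := by
        intro t ht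
        rw [pvGetD_map', dif_pos ht, PySem.List.pyGetD_natCast, List.getD_eq_getElem _ _ ht]
      by_cases hC : (r + i) < park.length ∧ (park.getD (r + i) []).getD c "" = "-1"
      · rw [if_pos (by exact ⟨by exact_mod_cast hC.1, hC.2⟩)]
        rw [ih (i + 1) m (k + 1) (by omega) (by omega)]
        have hsucc : pvRunAt (park.map (fun row => PySem.List.pyGetD row (c : Int) "")) (r + i)
            = 1 + pvRunAt (park.map (fun row => PySem.List.pyGetD row (c : Int) "")) (r + i + 1) := by
          apply pvRunAt_succ
          · simpa using hC.1
          · rw [hcol _ hC.1]; exact hC.2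
        rw [hsucc]
        rw [show r + (i + 1) = r + i + 1 from by omega]
        push_cast
        omega
      · rw [if_neg (by
          intro hY
          exact hC ⟨by exact_mod_cast hY.1, hY.2⟩)]
        have hz : pvRunAt (park.map (fun row => PySem.List.pyGetD row (c : Int) "")) (r + i) = 0 := by
          by_cases ht : r + i < park.length
          · apply pvRunAt_zero_of_ne
            rw [hcol _ ht]
            intro hx
            exact hC ⟨ht, hx⟩
          · apply pvRunAt_of_le
            simpa using (by omega : park.length ≤ r + i)
        rw [hz]
        have him' : (i : Int) ≤ (m : Int) := by exact_mod_cast him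
        omega
    · have hi' : i = m := by omega
      subst hi'
      have hemp : PySem.List.pyRange (i : Int) (i : Int) = [] := by simp [pysem]
      rw [hemp]
      simp [pvRowCnt]

lemma pvInner_eq (park : List (List String)) (r c : Int) (rIdxs cIdxs : List Int) :
    pvInner park r c rIdxs cIdxs =
      (rIdxs.flatMap (fun ri =>
        ((cIdxs.filter (fun ci => decide (pvCell park (r + ri) (c + ci) ≠ "-1"))).map (fun _ => ri))),
       rIdxs.flatMap (fun ri =>
        cIdxs.filter (fun ci => decide (pvCell park (r + ri) (c + ci) ≠ "-1")))) := by
  have go : ∀ (rs : List Int) (acc : List Int × List Int),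
      rs.foldl (fun acc ri =>
        cIdxs.foldl (fun acc2 ci =>
          if pvCell park (r + ri) (c + ci) ≠ "-1"
          then (acc2.1 ++ [ri], acc2.2 ++ [ci]) else acc2) acc) acc
      = (acc.1 ++ rs.flatMap (fun ri =>
          ((cIdxs.filter (fun ci => decide (pvCell park (r + ri) (c + ci) ≠ "-1"))).map (fun _ => ri))),
         acc.2 ++ rs.flatMap (fun ri =>
          cIdxs.filter (fun ci => decide (pvCell park (r + ri) (c + ci) ≠ "-1")))) := by
    intro rs
    induction rs with
    | nil => intro acc; simp
    | cons ri rest ih =>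
      intro acc
      rw [List.foldl_cons]
      have hstep : (fun (acc2 : List Int × List Int) ci =>
          if pvCell park (r + ri) (c + ci) ≠ "-1"
          then (acc2.1 ++ [ri], acc2.2 ++ [ci]) else acc2)
        = fun acc2 ci =>
          (if pvCell park (r + ri) (c + ci) ≠ "-1" then acc2.1 ++ [ri] else acc2.1,
           if pvCell park (r + ri) (c + ci) ≠ "-1" then acc2.2 ++ [ci] else acc2.2) := by
        funext acc2 ci
        split_ifs <;> rfl
      rw [show (acc : List Int × List Int) = (acc.1, acc.2) from rfl, hstep,
        PySem.List.foldl_prod_mk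
          (f := fun l ci => if pvCell park (r + ri) (c + ci) ≠ "-1" then l ++ [ri] else l)
          (g := fun l ci => if pvCell park (r + ri) (c + ci) ≠ "-1" then l ++ [ci] else l), ih]
      rw [PySem.List.foldl_append_ite (fun ci => pvCell park (r + ri) (c + ci) ≠ "-1") (fun _ => ri),
        PySem.List.foldl_append_ite_eq_filter (fun ci => pvCell park (r + ri) (c + ci) ≠ "-1")]
      simp [List.append_assoc]
  unfold pvInner
  rw [go]
  simp

lemma pvInner_empty_iff (park : List (List String)) (r c : Int) (rIdxs cIdxs : List Int) :
    ((pvInner park r c rIdxs cIdxs).1 = [] ∧ (pvInner park r c rIdxs cIdxs).2 = []) ↔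
      ∀ ri ∈ rIdxs, ∀ ci ∈ cIdxs, pvCell park (r + ri) (c + ci) = "-1" := by
  rw [pvInner_eq]
  simp only [List.flatMap_eq_nil_iff, List.map_eq_nil_iff, List.filter_eq_nil_iff,
    decide_eq_true_eq]
  constructor
  · intro h ri hri ci hci
    by_contra hne
    exact (h.1 ri hri) ci hci hne
  · intro h
    constructor <;> intro ri hri ci hci hne <;> exact hne (h ri hri ci hci)

-- the tail on mats: A's membership test + filtered max  =  B's single max with default
lemma pvMats_eq (mats : List Int) (v : Int) :
    (if v ∈ mats then v
     else
       let lowL := mats.foldl (fun l m => if v > m then l ++ [m] else l) ([] : List Int)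
       if lowL ≠ [] then (PySem.List.max? lowL (fun x => x)).getD (-1) else -1)
    = (PySem.List.max? (mats.filter (fun m => m ≤ v)) (fun x => x)).getD (-1) := by
  by_cases hv : v ∈ mats
  · rw [if_pos hv]
    have hne : mats.filter (fun m => decide (m ≤ v)) ≠ [] := by
      intro h
      have := List.filter_eq_nil_iff.mp h v hv
      simp at this
    obtain ⟨w, hw⟩ : ∃ w, PySem.List.max? (mats.filter fun m => decide (m ≤ v)) (fun x => x) = some w := by
      cases hmax : PySem.List.max? (mats.filter fun m => decide (m ≤ v)) (fun x => x) with
      | none => exact absurd ((PySem.List.max?_eq_none_iff _ _).mp hmax) hne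
      | some w => exact ⟨w, rfl⟩
    rw [hw]
    have hmem := PySem.List.max?_mem hw
    have hle : w ≤ v := by simpa using (List.mem_filter.mp hmem).2
    have hge : v ≤ w := PySem.List.max?_isMax hw v (List.mem_filter.mpr ⟨hv, by simp⟩)
    simp
    omega
  · rw [if_neg hv]
    have hfold : mats.foldl (fun l m => if v > m then l ++ [m] else l) [] = mats.filter (fun m => decide (v > m)) := by
      simpa using PySem.List.foldl_append_ite_eq_filter (fun m => v > m) mats []
    have hfeq : mats.filter (fun m => decide (v > m)) = mats.filter (fun m => decide (m ≤ v)) := by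
      apply List.filter_congr
      intro m hm
      have hne : m ≠ v := fun h => hv (h ▸ hm)
      simp only [decide_eq_decide]
      omega
    simp only [hfold, hfeq]
    by_cases hnil : mats.filter (fun m => decide (m ≤ v)) = []
    · have hnone : PySem.List.max? ([] : List Int) (fun x => x) = none :=
        (PySem.List.max?_eq_none_iff _ _).mpr rfl
      simp [hnil, hnone]
    · rw [if_pos hnil]

-- the per-cell bodies of the two double loops agree
lemma pvCell_eq_step (park : List (List String))
    (hrect : ∀ row ∈ park, (park.headD []).length ≤ row.length ∧
      ∀ s ∈ row.drop (park.headD []).length, s ≠ "-1")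
    (k j : Nat) (hk : k < park.length) (hj : j < (park.getD k []).length) (a : Int) :
    pvStepA park a (k : Int) (j : Int) =
      (if (park.getD k []).getD j "" = "-1" then
        let n := min (pvAtB (pvDownT park) (j : Int) (k : Int))
                     (pvAtB (park.map pvRuns) (k : Int) (j : Int))
        if n > 1 ∧ ((PySem.List.pyRange 1 n).all fun i =>
            decide (n ≤ pvAtB (park.map pvRuns) ((k : Int) + i) (j : Int)))
        then max a n else max a 1
      else a) := by
  classical
  have hpark_ne : park ≠ [] := by intro h; rw [h] at hk; simp at hk
  have hmemt : ∀ t, t < park.length → park.getD t [] ∈ park := by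
    intro t ht
    rw [List.getD_eq_getElem park [] ht]; exact List.getElem_mem ht
  have hlen : ∀ t, t < park.length → (park.headD []).length ≤ (park.getD t []).length :=
    fun t ht => (hrect _ (hmemt t ht)).1
  have htail : ∀ t, t < park.length → ∀ u : Nat, (park.headD []).length ≤ u →
      (park.getD t []).getD u "" ≠ "-1" := by
    intro t ht u hu
    by_cases hu2 : u < (park.getD t []).length
    · apply (hrect _ (hmemt t ht)).2
      rw [List.getD_eq_getElem _ _ hu2]
      have hb : u - (park.headD []).length < ((park.getD t []).drop (park.headD []).length).length := by
        rw [List.length_drop]; omega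
      have he : ((park.getD t []).drop (park.headD []).length)[u - (park.headD []).length] = (park.getD t [])[u]'hu2 := by
        rw [List.getElem_drop]
        congr 1
        omega
      rw [← he]
      exact List.getElem_mem hb
    · rw [List.getD_eq_default _ _ (by omega)]
      simp
  have hrowcap : ∀ t, t < park.length → ∀ u : Nat,
      pvRunAt (park.getD t []) u ≤ (park.headD []).length - u := by
    intro t ht u
    by_contra hgt
    push_neg at hgt
    have h := (pvRunAt_ge_iff (park.getD t []) (pvRunAt (park.getD t []) u) u).mp (le_refl _)
    have h2 := h ((park.headD []).length - u) (by omega)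
    exact htail t ht (u + ((park.headD []).length - u)) (by omega) h2.2
  have hW0 : PySem.List.pyGetD park 0 [] = park.headD [] := by
    cases park with
    | nil => rfl
    | cons h t => simp [pysem]
  have hRight : ∀ t u : Nat, t < park.length →
      pvAtB (park.map pvRuns) (t : Int) (u : Int) = (pvRunAt (park.getD t []) u : Int) := by
    intro t u ht
    unfold pvAtB
    rw [PySem.List.pyGetD_natCast, PySem.List.pyGetD_natCast]
    rw [pvGetD_map', dif_pos ht, pvRuns_eq_spec, getD_pvRunsSpec,
      List.getD_eq_getElem park [] ht]
  have hcolget : ∀ t, t < park.length →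
      (park.map (fun row => PySem.List.pyGetD row (j : Int) "")).getD t ""
        = (park.getD t []).getD j "" := by
    intro t ht
    rw [pvGetD_map', dif_pos ht, PySem.List.pyGetD_natCast, List.getD_eq_getElem _ _ ht]
  have hcollen : (park.map (fun row => PySem.List.pyGetD row (j : Int) "")).length
      = park.length := List.length_map ..
  simp only [pvStepA, pvCell_natCast]
  by_cases hcell : (park.getD k []).getD j "" = "-1"
  case neg => rw [if_neg hcell, if_neg hcell]
  case pos =>
    have hjW : j < (park.headD []).length := by
      by_contra hge
      exact htail k hk j (by omega) hcell
    have hDown : pvAtB (pvDownT park) (j : Int) (k : Int)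
        = (pvRunAt (park.map (fun row => PySem.List.pyGetD row (j : Int) "")) k : Int) := by
      unfold pvDownT pvAtB
      rw [if_neg hpark_ne, hW0,
        PySem.List.pyGetD_map_pyRange _ _ _ _ hjW,
        PySem.List.pyGetD_natCast, pvRuns_eq_spec, getD_pvRunsSpec]
    rw [if_pos hcell, if_pos hcell]
    rw [show ((PySem.List.pyGetD park 0 []).length : Int) = ((park.headD []).length : Int) from by rw [hW0]]
    -- right run from (k, j) and its tail
    have hccfull : pvRunAt (park.getD k []) j = 1 + pvRunAt (park.getD k []) (j + 1) :=
      pvRunAt_succ _ _ hj hcell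
    -- down run from (k, j) and its tail
    have hdd : pvRunAt (park.map (fun row => PySem.List.pyGetD row (j : Int) "")) k
        = 1 + pvRunAt (park.map (fun row => PySem.List.pyGetD row (j : Int) "")) (k + 1) := by
      apply pvRunAt_succ
      · rw [hcollen]; exact hk
      · rw [hcolget k hk]; exact hcell
    set cc1 := pvRunAt (park.getD k []) (j + 1) with hcc1def
    set dr := pvRunAt (park.map (fun row => PySem.List.pyGetD row (j : Int) "")) (k + 1) with hdrdef
    have hcol1 : pvColCnt park (k : Int)
        (PySem.List.pyRange ((j : Int) + 1) ((park.headD []).length : Int)) 1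
        = 1 + (cc1 : Int) := by
      have h := pvColCnt_eq park k (park.headD []).length (hlen k hk) (htail k hk)
        (park.headD []).length (j + 1) 1 (by omega)
      rw [show ((j : Int) + 1) = ((j + 1 : Nat) : Int) from by push_cast; ring]
      rw [h, hcc1def]
    rw [hcol1]
    have hrc : pvRowCnt park (k : Int) (j : Int)
        (PySem.List.pyRange 1 (1 + (cc1 : Int))) 1
        = 1 + min (cc1 : Int) (dr : Int) := by
      have h := pvRowCnt_eq park k j (1 + cc1) 1 (1 + cc1) 1 (by omega) (by omega)
      have e1 : ((1 : Nat) : Int) = (1 : Int) := by norm_num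
      have e2 : ((1 + cc1 : Nat) : Int) = 1 + (cc1 : Int) := by push_cast; ring
      rw [e1, e2] at h
      rw [h, ← hdrdef]
      omega
    rw [hrc, hDown, hRight k j hk, hccfull, hdd]
    rw [show ((1 + cc1 : Nat) : Int) = 1 + (cc1 : Int) from by push_cast; ring,
      show ((1 + dr : Nat) : Int) = 1 + (dr : Int) from by push_cast; ring]
    by_cases hmin : 1 ≤ min cc1 dr
    · have hminc : (1 : Int) ≤ min (cc1 : Int) (dr : Int) := by
        have h1 : 1 ≤ cc1 := by omega
        have h2 : 1 ≤ dr := by omega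
        have h1' : (1 : Int) ≤ (cc1 : Int) := by exact_mod_cast h1
        have h2' : (1 : Int) ≤ (dr : Int) := by exact_mod_cast h2
        omega
      rw [if_pos (by constructor <;> omega)]
      -- bounds used on both sides of the interior equivalence
      have hccW : 1 + cc1 ≤ (park.headD []).length - j := by
        have := hrowcap k hk j
        rw [hccfull] at this; omega
      have hddR : 1 + dr ≤ park.length - k := by
        have := pvRunAt_le (park.map (fun row => PySem.List.pyGetD row (j : Int) "")) k
        rw [hdd, hcollen] at this; omega
      -- the first column of the candidate square is all '-1'
      have hdown_all : ∀ t, t ≤ min cc1 dr → (park.getD (k + t) []).getD j "" = "-1" := by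
        intro t ht
        have hN : 1 + min cc1 dr ≤ pvRunAt (park.map (fun row => PySem.List.pyGetD row (j : Int) "")) k := by
          rw [hdd]; omega
        have hres := (pvRunAt_ge_iff _ (1 + min cc1 dr) k).mp hN t (by omega)
        have hlt : k + t < park.length := by rw [← hcollen]; exact hres.1
        rw [← hcolget (k + t) hlt]
        exact hres.2
      set M := min cc1 dr with hMdef
      have hMcast : min (cc1 : Int) (dr : Int) = (M : Int) := by omega
      rw [hMcast]
      have hA' : min (1 + (cc1 : Int)) (1 + (M : Int)) = 1 + (M : Int) := by
        have hMc : (M : Int) ≤ (cc1 : Int) := by exact_mod_cast (by omega : M ≤ cc1)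
        omega
      have hB' : min (1 + (dr : Int)) (1 + (cc1 : Int)) = 1 + (M : Int) := by
        have hMe : (M : Int) = min (cc1 : Int) (dr : Int) := hMcast.symm
        omega
      rw [hA', hB']
      have hiff :
          ((pvInner park (k : Int) (j : Int)
              (PySem.List.pyRange 1 (1 + (M : Int))) (PySem.List.pyRange 1 (1 + (M : Int)))).1 = [] ∧
           (pvInner park (k : Int) (j : Int)
              (PySem.List.pyRange 1 (1 + (M : Int))) (PySem.List.pyRange 1 (1 + (M : Int)))).2 = [])
          ↔ ((PySem.List.pyRange 1 (1 + (M : Int))).all fun i =>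
              decide (1 + (M : Int) ≤ pvAtB (park.map pvRuns) ((k : Int) + i) (j : Int))) = true := by
        rw [pvInner_empty_iff, List.all_eq_true]
        constructor
        · intro hint i hi
          rw [decide_eq_true_eq]
          have hi' := PySem.List.mem_pyRange_one.mp hi
          lift i to Nat using (by omega) with t
          have htM : t ≤ M := by omega
          have ht1 : 1 ≤ t := by exact_mod_cast hi'.1
          have htlt : k + t < park.length := by omega
          rw [show (k : Int) + (t : Int) = ((k + t : Nat) : Int) from by push_cast; ring,
            hRight (k + t) j htlt]
          have : 1 + M ≤ pvRunAt (park.getD (k + t) []) j := by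
            apply (pvRunAt_ge_iff _ (1 + M) j).mpr
            intro u hu
            constructor
            · have := hlen (k + t) htlt; omega
            · rcases Nat.eq_zero_or_pos u with rfl | hu1
              · simpa using hdown_all t htM
              · have hmem1 : (t : Int) ∈ PySem.List.pyRange 1 (1 + (M : Int)) :=
                  PySem.List.mem_pyRange_one.mpr (by constructor <;> [exact_mod_cast ht1; omega])
                have hmem2 : (u : Int) ∈ PySem.List.pyRange 1 (1 + (M : Int)) :=
                  PySem.List.mem_pyRange_one.mpr (by
                    constructor
                    · exact_mod_cast hu1
                    · have : u < 1 + M := hu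
                      exact_mod_cast (by omega : (u : Nat) < 1 + M))
                have hcellz := hint (t : Int) hmem1 (u : Int) hmem2
                rw [show (k : Int) + (t : Int) = ((k + t : Nat) : Int) from by push_cast; ring,
                  show (j : Int) + (u : Int) = ((j + u : Nat) : Int) from by push_cast; ring,
                  pvCell_natCast] at hcellz
                exact hcellz
          exact_mod_cast this
        · intro hall ri hri ci hci
          have hri' := PySem.List.mem_pyRange_one.mp hri
          have hci' := PySem.List.mem_pyRange_one.mp hci
          lift ri to Nat using (by omega) with t
          lift ci to Nat using (by omega) with u
          have ht1 : 1 ≤ t := by exact_mod_cast hri'.1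
          have htM : t ≤ M := by omega
          have hu1 : 1 ≤ u := by exact_mod_cast hci'.1
          have huM : u ≤ M := by omega
          have htlt : k + t < park.length := by omega
          have h1 := hall (t : Int) hri
          rw [decide_eq_true_eq,
            show (k : Int) + (t : Int) = ((k + t : Nat) : Int) from by push_cast; ring,
            hRight (k + t) j htlt] at h1
          have h2 : 1 + M ≤ pvRunAt (park.getD (k + t) []) j := by exact_mod_cast h1
          have h3 := (pvRunAt_ge_iff _ (1 + M) j).mp h2 u (by omega)
          rw [show (k : Int) + (t : Int) = ((k + t : Nat) : Int) from by push_cast; ring,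
            show (j : Int) + (u : Int) = ((j + u : Nat) : Int) from by push_cast; ring,
            pvCell_natCast]
          exact h3.2
      by_cases hint : ((pvInner park (k : Int) (j : Int)
            (PySem.List.pyRange 1 (1 + (M : Int))) (PySem.List.pyRange 1 (1 + (M : Int)))).1 = [] ∧
          (pvInner park (k : Int) (j : Int)
            (PySem.List.pyRange 1 (1 + (M : Int))) (PySem.List.pyRange 1 (1 + (M : Int)))).2 = [])
      · rw [if_pos hint, if_pos (by
          refine ⟨by omega, ?_⟩
          exact hiff.mp hint)]
        have : (1 : Int) ≤ (M : Int) := by exact_mod_cast hmin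
        omega
      · rw [if_neg hint, if_neg (by
          intro hand
          exact hint (hiff.mpr hand.2))]
    · have hM0 : min cc1 dr = 0 := by omega
      have hM0' : min (cc1 : Int) (dr : Int) = 0 := by
        rcases Nat.min_eq_zero_iff.mp hM0 with h | h <;> simp [h]
      rw [if_neg (by intro h; omega), if_neg (by intro h; have h1 := h.1; omega)]

lemma pvGrid_eq (park : List (List String))
    (hrect : ∀ row ∈ park, (park.headD []).length ≤ row.length ∧
      ∀ s ∈ row.drop (park.headD []).length, s ≠ "-1") :
    (PySem.List.enumerate park 0).foldl (fun ans p =>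
      (PySem.List.enumerate p.2 0).foldl (fun a q => pvStepA park a p.1 q.1) ans) (-1)
    = (PySem.List.enumerate park 0).foldl (fun b p =>
        (PySem.List.enumerate p.2 0).foldl (fun b2 q =>
          if q.2 = "-1" then
            let n := min (pvAtB (pvDownT park) q.1 p.1) (pvAtB (park.map pvRuns) p.1 q.1)
            if n > 1 ∧ ((PySem.List.pyRange 1 n).all fun i =>
                decide (n ≤ pvAtB (park.map pvRuns) (p.1 + i) q.1))
            then max b2 n else max b2 1
          else b2) b) (-1) := by
  apply PySem.List.foldl_congr_mem
  intro acc p hp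
  obtain ⟨k, hk, rfl⟩ := (PySem.List.mem_enumerate_iff park 0 p).mp hp
  apply PySem.List.foldl_congr_mem
  intro a q hq
  obtain ⟨j, hj, rfl⟩ := (PySem.List.mem_enumerate_iff _ 0 q).mp hq
  simp only [zero_add]
  have hgetd : park.getD k [] = park[k] := List.getD_eq_getElem park [] hk
  have hj' : j < (park.getD k []).length := by rw [hgetd]; exact hj
  rw [pvCell_eq_step park hrect k j hk hj' a]
  rw [hgetd, List.getD_eq_getElem _ _ hj]

-- ===== VERDICT (by name: the statement is the Claim_ definition above) =====
theorem solution_spec : Claim_equal_solution := by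
  unfold Claim_equal_solution
  intro mats park _hdom hpre
  unfold Spec_solution solution solution_alt
  rw [pvGrid_eq park hpre, pvMats_eq]
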